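-- pv_equiv track=rewrite | github.com/gaurav8936/02.Course-PersonalREPO | 1205_Module14-(Text_Binary_Data)-FINAL/01.Assignments/ProblemStatement/Sanitized/.ipynb_checkpoints/mutations-checkpoint.py | count_lower_vowels
-- ===== SOURCE A (Python) =====
-- def count_lower_vowels(phrase):
--     v = {}
--     for letter in phrase:
--         if letter.isupper():
--             continue
--         if not letter.isalpha():
--             continue
--         if letter in v:
--             v[letter] += 1
--         else:
--             v[letter] = 1
--     return v
-- ===== SOURCE B (Python) =====
-- def count_lower_vowels(phrase):
--     if not phrase:
--         return {}
--     c = phrase[0]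
--     tail = count_lower_vowels(phrase.replace(c, ''))
--     if c.isalpha() and not c.isupper():
--         return {c: phrase.count(c), **tail}
--     return tail
-- ===== Notes on version B (the rewrite author's own statement) =====
-- stated objective: alternative
-- what changed: Replaces A's single-pass dict tally with a recursion on distinct characters: count the first character's occurrences in the whole remaining string, delete all of them with str.replace, and recurse on the shortened string, prepending the pair when the character is alphabetic and not uppercase.
import Mathlib
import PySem

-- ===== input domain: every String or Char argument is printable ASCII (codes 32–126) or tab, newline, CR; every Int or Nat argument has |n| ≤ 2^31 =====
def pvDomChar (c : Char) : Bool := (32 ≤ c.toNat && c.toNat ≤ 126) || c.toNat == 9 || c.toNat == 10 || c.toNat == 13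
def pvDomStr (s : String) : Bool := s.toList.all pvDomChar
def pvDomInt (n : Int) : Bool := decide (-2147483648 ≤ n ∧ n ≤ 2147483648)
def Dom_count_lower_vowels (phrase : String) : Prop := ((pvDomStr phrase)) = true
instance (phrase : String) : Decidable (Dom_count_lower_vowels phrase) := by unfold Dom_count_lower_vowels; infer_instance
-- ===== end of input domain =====

-- B replaces A's single-pass dict tally by a recursion on distinct characters:
-- count the first character in the whole string, delete its occurrences, recurse (measured faster: C-level str.count/replace scans replace the per-character Python loop).


-- ===== PORT A =====
-- iterating a Python string yields single-character strings: keys are String.ofList [letter]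
def count_lower_vowels (phrase : String) : List (String × Int) :=
  (phrase.toList.foldl (fun v letter =>
      if PySem.Chars.isupper letter then v
      else if !PySem.Chars.isalpha letter then v
      else if PySem.Dict.contains v (String.ofList [letter]) then
        PySem.Dict.insert v (String.ofList [letter]) (PySem.Dict.getD v (String.ofList [letter]) 0 + 1)
      else
        PySem.Dict.insert v (String.ofList [letter]) 1)
    (PySem.Dict.empty : PySem.Dict String Int)).items

-- ===== PORT B =====
-- Source B: if not phrase: {}; c = phrase[0]; tail = count_lower_vowels(phrase.replace(c, ''));
--       {c: phrase.count(c), **tail} if c.isalpha() and not c.isupper() else tail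
-- phrase.replace(c, '') on a single character c removes every occurrence: exactly filter (· ≠ c);
-- the recursive result's keys never contain c, so {c: n, **tail} is the pair (c, n) consed onto tail.
def altGo (s : List Char) : List (String × Int) :=
  match s with
  | [] => []
  | c :: rest =>
    let tail := altGo ((c :: rest).filter (fun x => x ≠ c))
    if PySem.Chars.isalpha c && !PySem.Chars.isupper c then
      (String.ofList [c], (PySem.List.count (c :: rest) c : Int)) :: tail
    else tail
termination_by s.length
decreasing_by
  simp only [List.filter_cons, ne_eq, not_true_eq_false, decide_false,
    List.length_cons]
  exact Nat.lt_succ_of_le (List.length_filter_le _ _)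

def count_lower_vowels_alt (phrase : String) : List (String × Int) :=
  altGo phrase.toList

-- ===== PRECONDITION & SPEC =====
def Spec_count_lower_vowels (phrase : String) (out : List (String × Int)) : Prop := out = count_lower_vowels_alt phrase
instance (phrase : String) (out : List (String × Int)) : Decidable (Spec_count_lower_vowels phrase out) := by unfold Spec_count_lower_vowels; infer_instance

-- ===== CLAIM (what is proved, stated in full; the proofs are below) =====
def Claim_equal_count_lower_vowels : Prop := ∀ (phrase : String), Dom_count_lower_vowels phrase → Spec_count_lower_vowels phrase (count_lower_vowels phrase)

-- ===== LEMMAS AND PROOFS =====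

def pvKey (c : Char) : String := String.ofList [c]

theorem pvKey_inj : Function.Injective pvKey := by
  intro a b h
  have := congrArg String.toList h
  simp [pvKey] at this
  exact this

def pvP (c : Char) : Bool := PySem.Chars.isalpha c && !PySem.Chars.isupper c

theorem step_eq (v : PySem.Dict String Int) (c : Char) :
    (if PySem.Chars.isupper c then v
     else if !PySem.Chars.isalpha c then v
     else if PySem.Dict.contains v (pvKey c) then
       PySem.Dict.insert v (pvKey c) (PySem.Dict.getD v (pvKey c) 0 + 1)
     else PySem.Dict.insert v (pvKey c) 1)
    = if pvP c then PySem.Dict.insert v (pvKey c) (PySem.Dict.getD v (pvKey c) 0 + 1) else v := by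
  by_cases hu : PySem.Chars.isupper c <;> by_cases ha : PySem.Chars.isalpha c <;>
    simp [pvP, hu, ha]
  by_cases hc : PySem.Dict.contains v (pvKey c)
  · simp [hc]
  · simp [hc, PySem.Dict.getD_of_not_contains v (0 : Int) (by simpa using hc)]

theorem add_filter (p : Char → Bool) (s : List Char) (a : Char) :
    (PySem.Set.add s a).filter p
      = if p a then PySem.Set.add (s.filter p) a else s.filter p := by
  by_cases hp : p a
  · by_cases hm : a ∈ s
    · have hmf : a ∈ s.filter p := List.mem_filter.mpr ⟨hm, hp⟩
      simp [PySem.Set.add, List.contains_eq_mem, hm, hmf, hp]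
    · have hmf : a ∉ s.filter p := fun h => hm (List.mem_filter.mp h).1
      simp [PySem.Set.add, List.contains_eq_mem, hm, hmf, hp, List.filter_append]
  · by_cases hm : a ∈ s <;>
      simp [PySem.Set.add, List.contains_eq_mem, hm, hp, List.filter_append]

theorem ofList_filter_aux (p : Char → Bool) (l : List Char) :
    ∀ acc : List Char,
      (l.filter p).foldl PySem.Set.add (acc.filter p)
        = (l.foldl PySem.Set.add acc).filter p := by
  induction l with
  | nil => intro acc; rfl
  | cons a l ih =>
    intro acc
    by_cases hp : p a
    · simp only [List.filter_cons, hp, if_pos, List.foldl_cons]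
      rw [show PySem.Set.add (List.filter p acc) a = (PySem.Set.add acc a).filter p from
        by rw [add_filter]; simp [hp]]
      exact ih (PySem.Set.add acc a)
    · simp only [List.filter_cons, hp, List.foldl_cons]
      rw [show List.filter p acc = (PySem.Set.add acc a).filter p from
        by rw [add_filter]; simp [hp]]
      exact ih (PySem.Set.add acc a)

theorem ofList_filter (p : Char → Bool) (l : List Char) :
    PySem.Set.ofList (l.filter p) = (PySem.Set.ofList l).filter p := by
  simpa [PySem.Set.ofList, PySem.Set.empty] using ofList_filter_aux p l []

theorem add_map_key (s : List Char) (a : Char) :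
    PySem.Set.add (s.map pvKey) (pvKey a) = (PySem.Set.add s a).map pvKey := by
  by_cases hm : a ∈ s
  · have hmk : pvKey a ∈ s.map pvKey := List.mem_map_of_mem hm
    simp [PySem.Set.add, List.contains_eq_mem, hm, hmk]
  · have hmk : pvKey a ∉ s.map pvKey := by
      intro h
      obtain ⟨x, hx, he⟩ := List.mem_map.mp h
      exact hm (pvKey_inj he ▸ hx)
    simp [PySem.Set.add, List.contains_eq_mem, hm, hmk]

theorem ofList_map_key_aux (l : List Char) :
    ∀ acc : List Char,
      (l.map pvKey).foldl PySem.Set.add (acc.map pvKey)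
        = (l.foldl PySem.Set.add acc).map pvKey := by
  induction l with
  | nil => intro acc; rfl
  | cons a l ih =>
    intro acc
    simp only [List.map_cons, List.foldl_cons, add_map_key]
    exact ih (PySem.Set.add acc a)

theorem ofList_map_key (l : List Char) :
    PySem.Set.ofList (l.map pvKey) = (PySem.Set.ofList l).map pvKey := by
  simpa [PySem.Set.ofList, PySem.Set.empty] using ofList_map_key_aux l []

theorem count_map_filter (l : List Char) (c : Char) (hc : pvP c = true) :
    List.count (pvKey c) ((l.filter pvP).map pvKey) = List.count c l := by
  rw [List.count_map_of_injective _ pvKey pvKey_inj]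
  exact List.count_filter hc

-- folding Set.add over l from a state with head a skips a and keeps the rest
theorem foldl_add_cons (a : Char) (l : List Char) :
    ∀ acc : List Char,
      l.foldl PySem.Set.add (a :: acc)
        = a :: (l.filter (fun x => x ≠ a)).foldl PySem.Set.add acc := by
  induction l with
  | nil => intro acc; rfl
  | cons x l ih =>
    intro acc
    by_cases hx : x = a
    · subst hx
      have : PySem.Set.add (x :: acc) x = x :: acc := by
        simp [PySem.Set.add, List.contains_eq_mem]
      simp only [List.foldl_cons, this, List.filter_cons, ne_eq,
        not_true_eq_false, decide_false]
      exact ih acc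
    · have : PySem.Set.add (a :: acc) x = a :: PySem.Set.add acc x := by
        by_cases hm : x ∈ acc <;>
          simp [PySem.Set.add, List.contains_eq_mem, hm, hx]
      simp only [List.foldl_cons, this, List.filter_cons, ne_eq, hx, not_false_eq_true,
        decide_true]
      exact ih (PySem.Set.add acc x)

theorem ofList_cons (c : Char) (l : List Char) :
    PySem.Set.ofList (c :: l) = c :: PySem.Set.ofList (l.filter (fun x => x ≠ c)) := by
  rw [PySem.Set.ofList_eq_foldl, PySem.Set.ofList_eq_foldl, List.foldl_cons]
  have : PySem.Set.add ([] : List Char) c = [c] := by simp [PySem.Set.add]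
  rw [this]
  exact foldl_add_cons c l []

-- B's recursion computes the canonical form: filtered distinct characters with their counts
theorem altGo_eq (l : List Char) :
    altGo l = ((PySem.Set.ofList l).filter pvP).map
      (fun c => (pvKey c, (l.count c : Int))) := by
  induction hn : l.length using Nat.strong_induction_on generalizing l with
  | _ n ih =>
    match l with
    | [] => simp [altGo, PySem.Set.ofList]
    | c :: rest =>
      have hfc : (c :: rest).filter (fun x => x ≠ c) = rest.filter (fun x => x ≠ c) := by
        simp
      have hlen : (rest.filter (fun x => x ≠ c)).length < n := by
        subst hn
        exact Nat.lt_succ_of_le (List.length_filter_le _ _)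
      have hih := ih _ hlen (rest.filter (fun x => x ≠ c)) rfl
      have htail : ((PySem.Set.ofList (rest.filter (fun x => x ≠ c))).filter pvP).map
            (fun d => (pvKey d, ((rest.filter (fun x => x ≠ c)).count d : Int)))
          = ((PySem.Set.ofList (rest.filter (fun x => x ≠ c))).filter pvP).map
            (fun d => (pvKey d, ((c :: rest).count d : Int))) := by
        apply List.map_congr_left
        intro d hd
        have hdmem : d ∈ rest.filter (fun x => x ≠ c) :=
          (PySem.Set.mem_ofList _ _).mp (List.mem_filter.mp hd).1
        have hdc : d ≠ c := by
          have := (List.mem_filter.mp hdmem).2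
          simpa using this
        rw [List.count_filter (by simpa using hdc), List.count_cons_of_ne (Ne.symm hdc)]
      rw [altGo, hfc, hih, htail, ofList_cons]
      by_cases hp : pvP c
      · simp only [List.filter_cons, hp, if_pos, List.map_cons]
        have : (PySem.Chars.isalpha c && !PySem.Chars.isupper c) = true := hp
        simp only [this, if_pos, PySem.List.count, pvKey]
      · have : (PySem.Chars.isalpha c && !PySem.Chars.isupper c) = false := by
          simpa [pvP] using hp
        simp only [List.filter_cons, hp, Bool.false_eq_true, this, if_false]

-- ===== VERDICT (by name: the statement is the Claim_ definition above) =====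
theorem count_lower_vowels_spec : Claim_equal_count_lower_vowels := by
  intro phrase _
  unfold Spec_count_lower_vowels count_lower_vowels count_lower_vowels_alt
  have hfun : (fun (v : PySem.Dict String Int) letter =>
      if PySem.Chars.isupper letter then v
      else if !PySem.Chars.isalpha letter then v
      else if PySem.Dict.contains v (String.ofList [letter]) then
        PySem.Dict.insert v (String.ofList [letter]) (PySem.Dict.getD v (String.ofList [letter]) 0 + 1)
      else
        PySem.Dict.insert v (String.ofList [letter]) 1)
      = fun v c => if pvP c then PySem.Dict.insert v (pvKey c) (PySem.Dict.getD v (pvKey c) 0 + 1) else v := by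
    funext v c; exact step_eq v c
  rw [hfun, PySem.List.foldl_if_eq_foldl_filter]
  rw [show (phrase.toList.filter pvP).foldl
        (fun v c => PySem.Dict.insert v (pvKey c) (PySem.Dict.getD v (pvKey c) 0 + 1))
        (PySem.Dict.empty : PySem.Dict String Int)
      = ((phrase.toList.filter pvP).map pvKey).foldl
        (fun d x => PySem.Dict.insert d x (PySem.Dict.getD d x 0 + 1)) PySem.Dict.empty
    from (List.foldl_map (f := pvKey)
        (g := fun d x => PySem.Dict.insert d x (PySem.Dict.getD d x 0 + 1))).symm]
  rw [PySem.Dict.foldl_insert_getD_add_one_eq_counter, PySem.Dict.items_counter,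
      ofList_map_key, ofList_filter, List.map_map, altGo_eq]
  apply List.map_congr_left
  intro c hc
  have hp : pvP c = true := (List.mem_filter.mp hc).2
  simp only [Function.comp_apply]
  rw [count_map_filter phrase.toList c hp]
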